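-- pv_equiv track=rewrite | github.com/eli050/intel-data-processor | report_generator.py | generate_mission_summary
-- ===== SOURCE A (Python) =====
-- def generate_mission_summary(missions):
--     """
--     Generates a summary report for a list of missions.
--
--     Args:
--         missions (list): A list of dictionaries, where each dictionary represents a mission
--                          and must contain a "status" key.
--
--     Returns:
--         str: A formatted string containing the mission summary.
--     """
--     if not isinstance(missions, list):
--         return "Error: Input must be a list of missions."
--
--     total = len(missions)
--     # Count missions with "Active" status
--     active = len([m for m in missions if m.get("status") == "Active"])
--     # Count missions with "Complete" status
--     complete = len([m for m in missions if m.get("status") == "Complete"])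
--     pending = total - active - complete
--
--     # Create the report using an f-string for easy formatting
--     report = f"""
-- === MISSION INTELLIGENCE SUMMARY ===
-- Total Missions: {total}
-- Active Missions: {active}
-- Completed Missions: {complete}
-- Pending Missions: {pending}
-- ==================================
-- """
--     return report.strip()
-- ===== SOURCE B (Python) =====
-- def generate_mission_summary(missions):
--     if not isinstance(missions, list):
--         return "Error: Input must be a list of missions."
--
--     total = active = complete = pending = 0
--     for m in missions:
--         total += 1
--         status = m.get("status")
--         if status == "Active":
--             active += 1
--         elif status == "Complete":
--             complete += 1
--         else:
--             pending += 1
--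
--     report = f"""
-- === MISSION INTELLIGENCE SUMMARY ===
-- Total Missions: {total}
-- Active Missions: {active}
-- Completed Missions: {complete}
-- Pending Missions: {pending}
-- ==================================
-- """
--     return report.strip()
-- ===== Notes on version B (the rewrite author's own statement) =====
-- stated objective: alternative
-- what changed: Replaced the two filtered list comprehensions and the pending-by-subtraction arithmetic with one explicit loop that classifies each mission exactly once, incrementing total/active/complete directly and counting pending in the else branch instead of deriving it.
import Mathlib
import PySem

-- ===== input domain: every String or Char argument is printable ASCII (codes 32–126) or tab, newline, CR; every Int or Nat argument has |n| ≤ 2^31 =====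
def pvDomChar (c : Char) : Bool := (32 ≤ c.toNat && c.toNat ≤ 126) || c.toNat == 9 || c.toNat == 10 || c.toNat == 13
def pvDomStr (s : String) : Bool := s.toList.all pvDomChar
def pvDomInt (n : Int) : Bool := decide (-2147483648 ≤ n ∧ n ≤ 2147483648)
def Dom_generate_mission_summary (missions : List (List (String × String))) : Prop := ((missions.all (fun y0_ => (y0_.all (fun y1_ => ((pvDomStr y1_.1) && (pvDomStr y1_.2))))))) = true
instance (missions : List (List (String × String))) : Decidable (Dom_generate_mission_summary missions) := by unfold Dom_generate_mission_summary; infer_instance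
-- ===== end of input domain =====

-- B replaces A's two filtered comprehensions plus pending-by-subtraction with one loop
-- classifying each mission once (pending counted directly); same return value.

-- ===== PORT A =====
-- m.get("status"): first-match lookup in the association list (the dict convention)
def pvGetStatus (m : List (String × String)) : Option String :=
  (m.find? (fun p => p.1 == "status")).map (·.2)

def generate_mission_summary (missions : List (List (String × String))) : String :=
  let total : Int := missions.length
  let active : Int := (missions.filter (fun m => pvGetStatus m == some "Active")).length
  let complete : Int := (missions.filter (fun m => pvGetStatus m == some "Complete")).length
  let pending : Int := total - active - complete
  let report := "\n=== MISSION INTELLIGENCE SUMMARY ===\nTotal Missions: " ++ PySem.Int.toStr total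
    ++ "\nActive Missions: " ++ PySem.Int.toStr active
    ++ "\nCompleted Missions: " ++ PySem.Int.toStr complete
    ++ "\nPending Missions: " ++ PySem.Int.toStr pending
    ++ "\n==================================\n"
  PySem.Str.strip report

-- ===== PORT B =====
-- one classifying step of B's loop: bump total and exactly one of active/complete/pending
def tallyStep (acc : Int × Int × Int × Int) (m : List (String × String)) : Int × Int × Int × Int :=
  let status := pvGetStatus m
  if status == some "Active" then (acc.1 + 1, acc.2.1 + 1, acc.2.2.1, acc.2.2.2)
  else if status == some "Complete" then (acc.1 + 1, acc.2.1, acc.2.2.1 + 1, acc.2.2.2)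
  else (acc.1 + 1, acc.2.1, acc.2.2.1, acc.2.2.2 + 1)

def generate_mission_summary_alt (missions : List (List (String × String))) : String :=
  let acc := missions.foldl tallyStep (0, 0, 0, 0)
  let total := acc.1
  let active := acc.2.1
  let complete := acc.2.2.1
  let pending := acc.2.2.2
  let report := "\n=== MISSION INTELLIGENCE SUMMARY ===\nTotal Missions: " ++ PySem.Int.toStr total
    ++ "\nActive Missions: " ++ PySem.Int.toStr active
    ++ "\nCompleted Missions: " ++ PySem.Int.toStr complete
    ++ "\nPending Missions: " ++ PySem.Int.toStr pending
    ++ "\n==================================\n"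
  PySem.Str.strip report

-- ===== PRECONDITION & SPEC =====
def Spec_generate_mission_summary (missions : List (List (String × String))) (out : String) : Prop := out = generate_mission_summary_alt missions
instance (missions : List (List (String × String))) (out : String) : Decidable (Spec_generate_mission_summary missions out) := by unfold Spec_generate_mission_summary; infer_instance

-- ===== CLAIM (what is proved, stated in full; the proofs are below) =====
def Claim_equal_generate_mission_summary : Prop := ∀ (missions : List (List (String × String))), Dom_generate_mission_summary missions → Spec_generate_mission_summary missions (generate_mission_summary missions)

-- ===== LEMMAS AND PROOFS =====
-- B's fold computes (total, active-filter length, complete-filter length, total − active − complete)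
theorem tally_fold (missions : List (List (String × String))) :
    ∀ t a c p : Int, missions.foldl tallyStep (t, a, c, p) =
      (t + missions.length,
       a + ((missions.filter (fun m => pvGetStatus m == some "Active")).length : Int),
       c + ((missions.filter (fun m => pvGetStatus m == some "Complete")).length : Int),
       p + (missions.length : Int)
         - ((missions.filter (fun m => pvGetStatus m == some "Active")).length : Int)
         - ((missions.filter (fun m => pvGetStatus m == some "Complete")).length : Int)) := by
  induction missions with
  | nil => intro t a c p; simp
  | cons m ms ih =>
    intro t a c p
    by_cases hA : (pvGetStatus m == some "Active") = true
    · have hC : (pvGetStatus m == some "Complete") = false := by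
        simp only [beq_iff_eq] at hA ⊢; simp [hA]
      have hstep : tallyStep (t, a, c, p) m = (t + 1, a + 1, c, p) := by
        simp [tallyStep, hA]
      rw [List.foldl_cons, hstep, ih]
      simp [List.filter_cons, hA, hC, Prod.ext_iff]
      all_goals (push_cast; omega)
    · by_cases hC : (pvGetStatus m == some "Complete") = true
      · have hstep : tallyStep (t, a, c, p) m = (t + 1, a, c + 1, p) := by
          simp [tallyStep, hA, hC]
        rw [List.foldl_cons, hstep, ih]
        simp [List.filter_cons, hA, hC, Prod.ext_iff]
        all_goals (push_cast; omega)
      · have hstep : tallyStep (t, a, c, p) m = (t + 1, a, c, p + 1) := by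
          simp [tallyStep, hA, hC]
        rw [List.foldl_cons, hstep, ih]
        simp [List.filter_cons, hA, hC, Prod.ext_iff]
        all_goals (push_cast; omega)

-- ===== VERDICT (by name: the statement is the Claim_ definition above) =====
theorem generate_mission_summary_spec : Claim_equal_generate_mission_summary := by
  intro missions _
  simp only [Spec_generate_mission_summary, generate_mission_summary, generate_mission_summary_alt,
    tally_fold]
  norm_num
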